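-- pv_equiv track=rewrite | github.com/himani2411/N-Queens-AI | arrange_pichus.py | safe_to_place_pichus_in_rows_cols
-- ===== SOURCE A (Python) =====
-- def safe_to_place_pichus_in_rows_cols(board, row, col):
--     # check for pichus in a col and rows
--
--     countinRowfromStart = 0
--     countInaRowTillEnd = 0
--
--     countColfromStart = 0
--     countColTillEnd = 0
--
--     # Keeping row same and checking till the column index (So till end index point)
--     # So scanning the rows from left end of the board to the points position(excluding the point)
--     for i in range(0, col, 1):
--         if board[row][i] == '@' or board[row][i] == 'X':
--             countinRowfromStart = 0
--         if board[row][i] == 'p':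
--             countinRowfromStart = 1
--
--     # Keeping the row same and checking the column from end of the board to the given value
--     # So scanning the rows from right end of the board to the points position(excluding the point)
--     for j in range(len(board[0]) - 1, col, -1):
--         if board[row][j] == '@' or board[row][j] == 'X':
--             countInaRowTillEnd = 0
--         if board[row][j] == 'p':
--             countInaRowTillEnd = 1
--
--     # Keeping the Column same and checking the Column from 0 to given value
--     # So scanning the columns from top end of the board to the points position(excluding the point)
--     for k in range(0, row, 1):
--         if board[k][col] == '@' or board[k][col] == 'X':
--             countColfromStart = 0
--         if board[k][col] == 'p':
--             countColfromStart = 1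
--
--     # Keeping the Column index same and checking the columns from end of the board to the given row value
--     # So scanning the columns from bottom end of the board to the points position(excluding the point)
--     for l in range(len(board) - 1, row, -1):
--         if board[l][col] == '@' or board[l][col] == 'X':
--             countColTillEnd = 0
--         if board[l][col] == 'p':
--             countColTillEnd = 1
--
--         #If the sum is 0 then we can add the pichu as we will get >0 only if we encountered a pichu
--     return countinRowfromStart + countInaRowTillEnd + countColfromStart + countColTillEnd
-- ===== SOURCE B (Python) =====
-- def safe_to_place_pichus_in_rows_cols(board, row, col):
--     # Outward break-on-first-relevant scans instead of four flag-overwriting full passes.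
--     def first_hit(indices, read):
--         for i in indices:
--             c = read(i)
--             if c == 'p':
--                 return 1
--             if c == '@' or c == 'X':
--                 return 0
--         return 0
--
--     read_row = lambda j: board[row][j]
--     read_col = lambda k: board[k][col]
--     return (first_hit(range(col - 1, -1, -1), read_row)
--           + first_hit(range(col + 1, len(board[0])), read_row)
--           + first_hit(range(row - 1, -1, -1), read_col)
--           + first_hit(range(row + 1, len(board)), read_col))
-- ===== Notes on version B (the rewrite author's own statement) =====
-- stated objective: simpler
-- what changed: Replaces A's four full scans that keep overwriting a flag (so the relevant cell nearest the target wins) with a single early-exit helper that scans outward from the target position and returns on the first 'p' or first blocker, applied to the four outward index ranges.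
import Mathlib
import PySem

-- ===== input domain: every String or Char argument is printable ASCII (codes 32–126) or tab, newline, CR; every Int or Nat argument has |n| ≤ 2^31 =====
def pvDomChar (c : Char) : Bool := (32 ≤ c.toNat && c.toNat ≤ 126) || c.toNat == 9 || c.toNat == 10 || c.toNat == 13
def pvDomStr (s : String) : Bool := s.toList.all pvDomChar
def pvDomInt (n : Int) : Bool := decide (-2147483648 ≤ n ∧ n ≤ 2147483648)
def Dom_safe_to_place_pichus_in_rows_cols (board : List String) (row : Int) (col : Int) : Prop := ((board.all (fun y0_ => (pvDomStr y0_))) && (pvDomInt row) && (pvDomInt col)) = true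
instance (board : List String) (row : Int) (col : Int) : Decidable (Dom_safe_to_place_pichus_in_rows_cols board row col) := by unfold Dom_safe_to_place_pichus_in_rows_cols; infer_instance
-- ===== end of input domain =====

-- B replaces A's four flag-overwriting full row/column scans by one early-exit first-hit helper
-- applied to the four outward index ranges (objective: simpler).

-- ===== PORT A =====
-- one body of A's loops: 'if cell == '@' or cell == 'X': flag = 0; if cell == 'p': flag = 1'
def pvStepA (flag : Int) (c : Option Char) : Int :=
  let flag1 := if c = some '@' ∨ c = some 'X' then 0 else flag
  if c = some 'p' then 1 else flag1

-- board[r][i] (none = IndexError, excluded by Pre_)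
def pvCellA (board : List String) (r i : Int) : Option Char :=
  (PySem.List.pyGet? board r).bind (fun s => PySem.Str.pyGet? s i)

def safe_to_place_pichus_in_rows_cols (board : List String) (row : Int) (col : Int) : Int :=
  -- for i in range(0, col, 1)
  let countinRowfromStart :=
    (PySem.List.pyRange 0 col 1).foldl (fun fl i => pvStepA fl (pvCellA board row i)) 0
  -- for j in range(len(board[0]) - 1, col, -1)
  let countInaRowTillEnd :=
    (PySem.List.pyRange (PySem.Str.len (PySem.List.pyGetD board 0 "") - 1) col (-1)).foldl
      (fun fl j => pvStepA fl (pvCellA board row j)) 0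
  -- for k in range(0, row, 1)
  let countColfromStart :=
    (PySem.List.pyRange 0 row 1).foldl (fun fl k => pvStepA fl (pvCellA board k col)) 0
  -- for l in range(len(board) - 1, row, -1)
  let countColTillEnd :=
    (PySem.List.pyRange (PySem.List.len board - 1) row (-1)).foldl
      (fun fl l => pvStepA fl (pvCellA board l col)) 0
  countinRowfromStart + countInaRowTillEnd + countColfromStart + countColTillEnd

-- ===== PORT B =====
-- first_hit(indices, read): 1 on the first 'p', 0 on the first '@'/'X', 0 at the end
-- (read i = none is Python's IndexError there, excluded by Pre_)
def pvFirstHitB (read : Int → Option Char) : List Int → Int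
  | [] => 0
  | i :: rest =>
    match read i with
    | some c => if c = 'p' then 1 else if c = '@' ∨ c = 'X' then 0 else pvFirstHitB read rest
    | none => 0

def safe_to_place_pichus_in_rows_cols_alt (board : List String) (row : Int) (col : Int) : Int :=
  let read_row := fun j => (PySem.List.pyGet? board row).bind (fun s => PySem.Str.pyGet? s j)
  let read_col := fun k => (PySem.List.pyGet? board k).bind (fun s => PySem.Str.pyGet? s col)
  pvFirstHitB read_row (PySem.List.pyRange (col - 1) (-1) (-1))
    + pvFirstHitB read_row (PySem.List.pyRange (col + 1) (PySem.Str.len (PySem.List.pyGetD board 0 "")) 1)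
    + pvFirstHitB read_col (PySem.List.pyRange (row - 1) (-1) (-1))
    + pvFirstHitB read_col (PySem.List.pyRange (row + 1) (PySem.List.len board) 1)

-- ===== PRECONDITION & SPEC =====
-- Pre_ is exactly A's return domain: the board is nonempty (A always reads len(board[0])) and every
-- cell index A's four loops touch is in Python range, stated as closed bounds (the two row-wise loops
-- touch a contiguous index interval of board[row]; the two column-wise loops touch the listed rows) —
-- it excludes no input on which A returns.
def Pre_safe_to_place_pichus_in_rows_cols (board : List String) (row : Int) (col : Int) : Prop :=
  board ≠ [] ∧
  (0 < col →
    PySem.Raise.InRange board.length row ∧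
    col ≤ ((PySem.List.pyGetD board row "").toList.length : Int)) ∧
  (col < ((PySem.List.pyGetD board 0 "").toList.length : Int) - 1 →
    PySem.Raise.InRange board.length row ∧
    ((PySem.List.pyGetD board 0 "").toList.length : Int) - 1
      < ((PySem.List.pyGetD board row "").toList.length : Int) ∧
    -((PySem.List.pyGetD board row "").toList.length : Int) ≤ col + 1) ∧
  (0 < row → row ≤ (board.length : Int)) ∧
  (∀ k ∈ PySem.List.pyRange 0 (min row (board.length : Int)) 1,
    PySem.Raise.InRange (PySem.List.pyGetD board k "").toList.length col) ∧
  (row < (board.length : Int) - 1 → -(board.length : Int) ≤ row + 1) ∧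
  (∀ l ∈ PySem.List.pyRange ((board.length : Int) - 1) (max row (-(board.length : Int) - 1)) (-1),
    PySem.Raise.InRange (PySem.List.pyGetD board l "").toList.length col)
instance (board : List String) (row : Int) (col : Int) : Decidable (Pre_safe_to_place_pichus_in_rows_cols board row col) := by unfold Pre_safe_to_place_pichus_in_rows_cols; infer_instance

def pvWitness_safe_to_place_pichus_in_rows_cols : List String × Int × Int := (["p@.", ".p.", "..."], 1, 1)

def Spec_safe_to_place_pichus_in_rows_cols (board : List String) (row : Int) (col : Int) (out : Int) : Prop := out = safe_to_place_pichus_in_rows_cols_alt board row col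
instance (board : List String) (row : Int) (col : Int) (out : Int) : Decidable (Spec_safe_to_place_pichus_in_rows_cols board row col out) := by unfold Spec_safe_to_place_pichus_in_rows_cols; infer_instance

-- ===== CLAIM (what is proved, stated in full; the proofs are below) =====
def Claim_equal_safe_to_place_pichus_in_rows_cols : Prop := ∀ (board : List String) (row : Int) (col : Int), Dom_safe_to_place_pichus_in_rows_cols board row col → Pre_safe_to_place_pichus_in_rows_cols board row col → Spec_safe_to_place_pichus_in_rows_cols board row col (safe_to_place_pichus_in_rows_cols board row col)

-- ===== LEMMAS AND PROOFS =====

-- Python indexing succeeds and returns the defaulted read when the index is in range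
theorem pvGet?_eq_some_getD (xs : List String) (i : Int) (d : String)
    (h : PySem.Raise.InRange xs.length i) :
    PySem.List.pyGet? xs i = some (PySem.List.pyGetD xs i d) := by
  simp only [PySem.List.pyGetD]
  cases hh : PySem.List.pyGet? xs i with
  | none => exact absurd ((PySem.List.pyGet?_eq_none_iff _ _).mp hh) (by simp [h])
  | some v => rfl

-- a cell both loops touch is really there
theorem pvCell_ne_none (board : List String) (r i : Int)
    (hr : PySem.Raise.InRange board.length r)
    (hi : PySem.Raise.InRange (PySem.List.pyGetD board r "").toList.length i) :
    pvCellA board r i ≠ none := by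
  intro hn
  rw [pvCellA, pvGet?_eq_some_getD board r "" hr] at hn
  have hn' : PySem.Chars.pyGet? (PySem.List.pyGetD board r "").toList i = none := hn
  exact absurd ((PySem.List.pyGet?_eq_none_iff _ _).mp hn') (by simpa using hi)

-- A's flag fold over a sequence of cells equals B's first-hit scan of the reversed sequence
theorem pvScanEq (f : Int → Option Char) (l : List Int) (h : ∀ i ∈ l, f i ≠ none) :
    l.foldl (fun fl i => pvStepA fl (f i)) 0 = pvFirstHitB f l.reverse := by
  induction l using List.reverseRecOn with
  | nil => simp [pvFirstHitB]
  | append_singleton l x ih =>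
    obtain ⟨c, hc⟩ := Option.ne_none_iff_exists'.mp (h x (by simp))
    rw [List.foldl_append, List.reverse_append, ih (fun i hi => h i (by simp [hi]))]
    simp only [List.foldl_cons, List.foldl_nil, List.reverse_cons, List.reverse_nil,
      List.nil_append, List.cons_append]
    simp only [pvFirstHitB, pvStepA, hc, Option.some.injEq]

-- range(a, b, -1) reversed is range(b+1, a+1, 1)
theorem pvRangeRevNegAux : ∀ (n : Nat) (a b : Int), (a - b).toNat = n →
    (PySem.List.pyRange a b (-1)).reverse = PySem.List.pyRange (b + 1) (a + 1) 1 := by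
  intro n
  induction n with
  | zero =>
    intro a b hn
    rw [PySem.List.pyRange_neg_one_eq_nil (by omega), PySem.List.pyRange_one_eq_nil (by omega)]
    rfl
  | succ n ih =>
    intro a b hn
    rw [PySem.List.pyRange_neg_one_cons (by omega), List.reverse_cons, ih (a - 1) b (by omega),
      sub_add_cancel, PySem.List.pyRange_one_succ_right (by omega)]

theorem pvRangeRevNeg (a b : Int) :
    (PySem.List.pyRange a b (-1)).reverse = PySem.List.pyRange (b + 1) (a + 1) 1 :=
  pvRangeRevNegAux _ a b rfl

-- range(a, b, 1) reversed is range(b-1, a-1, -1)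
theorem pvRangeRevPos (a b : Int) :
    (PySem.List.pyRange a b 1).reverse = PySem.List.pyRange (b - 1) (a - 1) (-1) := by
  have h := pvRangeRevNeg (b - 1) (a - 1)
  rw [sub_add_cancel, sub_add_cancel] at h
  rw [← h, List.reverse_reverse]

-- ===== VERDICT (by name: the statement is the Claim_ definition above) =====
theorem safe_to_place_pichus_in_rows_cols_spec : Claim_equal_safe_to_place_pichus_in_rows_cols := by
  intro board row col _ hpre
  obtain ⟨hne, hp1, hp2, hp3, hp4, hp5, hp6⟩ := hpre
  unfold Spec_safe_to_place_pichus_in_rows_cols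
  have hIn : ∀ (len : Nat) (i : Int), -(len : Int) ≤ i → i < (len : Int) →
      PySem.Raise.InRange len i := by
    intro len i hi1 hi2
    simp [PySem.Raise.InRange]
    omega
  have hInBds : ∀ (len : Nat) (i : Int), PySem.Raise.InRange len i →
      -(len : Int) ≤ i ∧ i < (len : Int) := by
    intro len i h
    simp [PySem.Raise.InRange] at h
    omega
  have hL0 : PySem.Str.len (PySem.List.pyGetD board 0 "")
      = (((PySem.List.pyGetD board 0 "").toList.length : Nat) : Int) := by
    simp [PySem.Str.len_eq]
  have hNl : PySem.List.len board = ((board.length : Nat) : Int) := by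
    simp [PySem.List.len_eq]
  -- every cell each loop touches exists
  have h1 : ∀ i ∈ PySem.List.pyRange 0 col 1, pvCellA board row i ≠ none := by
    intro i hi
    rw [PySem.List.mem_pyRange_one] at hi
    obtain ⟨hrIn, hcolLe⟩ := hp1 (by omega)
    exact pvCell_ne_none board row i hrIn (hIn _ _ (by omega) (by omega))
  have h2 : ∀ j ∈ PySem.List.pyRange (PySem.Str.len (PySem.List.pyGetD board 0 "") - 1) col (-1),
      pvCellA board row j ≠ none := by
    intro j hj
    rw [hL0, ← List.mem_reverse, pvRangeRevNeg, PySem.List.mem_pyRange_one] at hj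
    obtain ⟨hrIn, hmax, hmin⟩ := hp2 (by omega)
    exact pvCell_ne_none board row j hrIn (hIn _ _ (by omega) (by omega))
  have h3 : ∀ k ∈ PySem.List.pyRange 0 row 1, pvCellA board k col ≠ none := by
    intro k hk
    rw [PySem.List.mem_pyRange_one] at hk
    have hrN : row ≤ (board.length : Int) := hp3 (by omega)
    have hkmem : k ∈ PySem.List.pyRange 0 (min row (board.length : Int)) 1 := by
      rw [PySem.List.mem_pyRange_one]
      omega
    exact pvCell_ne_none board k col (hIn _ _ (by omega) (by omega)) (hp4 k hkmem)
  have h4 : ∀ l ∈ PySem.List.pyRange (PySem.List.len board - 1) row (-1),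
      pvCellA board l col ≠ none := by
    intro l hl
    rw [hNl, ← List.mem_reverse, pvRangeRevNeg, PySem.List.mem_pyRange_one] at hl
    have hmin : -(board.length : Int) ≤ row + 1 := hp5 (by omega)
    have hmaxr : max row (-(board.length : Int) - 1) = row := max_eq_left (by omega)
    have hlmem : l ∈ PySem.List.pyRange ((board.length : Int) - 1)
        (max row (-(board.length : Int) - 1)) (-1) := by
      rw [← List.mem_reverse, pvRangeRevNeg, PySem.List.mem_pyRange_one, hmaxr]
      omega
    exact pvCell_ne_none board l col (hIn _ _ (by omega) (by omega)) (hp6 l hlmem)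
  -- B's outward ranges are the reverses of A's ranges
  have e1 : PySem.List.pyRange (col - 1) (-1) (-1) = (PySem.List.pyRange 0 col 1).reverse := by
    have h := pvRangeRevPos 0 col
    norm_num at h
    exact h.symm
  have e2 : PySem.List.pyRange (col + 1) (PySem.Str.len (PySem.List.pyGetD board 0 "")) 1
      = (PySem.List.pyRange (PySem.Str.len (PySem.List.pyGetD board 0 "") - 1) col (-1)).reverse := by
    rw [pvRangeRevNeg, sub_add_cancel]
  have e3 : PySem.List.pyRange (row - 1) (-1) (-1) = (PySem.List.pyRange 0 row 1).reverse := by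
    have h := pvRangeRevPos 0 row
    norm_num at h
    exact h.symm
  have e4 : PySem.List.pyRange (row + 1) (PySem.List.len board) 1
      = (PySem.List.pyRange (PySem.List.len board - 1) row (-1)).reverse := by
    rw [pvRangeRevNeg, sub_add_cancel]
  -- B's cell readers are A's
  have hcellr : (fun j => (PySem.List.pyGet? board row).bind (fun s => PySem.Str.pyGet? s j))
      = pvCellA board row := rfl
  have hcellc : (fun k => (PySem.List.pyGet? board k).bind (fun s => PySem.Str.pyGet? s col))
      = (fun k => pvCellA board k col) := rfl
  -- the four scans agree
  have hs1 : (PySem.List.pyRange 0 col 1).foldl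
        (fun fl i => pvStepA fl (pvCellA board row i)) 0
      = pvFirstHitB (pvCellA board row) (PySem.List.pyRange 0 col 1).reverse :=
    pvScanEq (pvCellA board row) _ h1
  have hs2 : (PySem.List.pyRange (PySem.Str.len (PySem.List.pyGetD board 0 "") - 1) col (-1)).foldl
        (fun fl j => pvStepA fl (pvCellA board row j)) 0
      = pvFirstHitB (pvCellA board row)
          (PySem.List.pyRange (PySem.Str.len (PySem.List.pyGetD board 0 "") - 1) col (-1)).reverse :=
    pvScanEq (pvCellA board row) _ h2
  have hs3 : (PySem.List.pyRange 0 row 1).foldl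
        (fun fl k => pvStepA fl (pvCellA board k col)) 0
      = pvFirstHitB (fun k => pvCellA board k col) (PySem.List.pyRange 0 row 1).reverse :=
    pvScanEq (fun k => pvCellA board k col) _ h3
  have hs4 : (PySem.List.pyRange (PySem.List.len board - 1) row (-1)).foldl
        (fun fl l => pvStepA fl (pvCellA board l col)) 0
      = pvFirstHitB (fun k => pvCellA board k col)
          (PySem.List.pyRange (PySem.List.len board - 1) row (-1)).reverse :=
    pvScanEq (fun k => pvCellA board k col) _ h4
  simp only [safe_to_place_pichus_in_rows_cols, safe_to_place_pichus_in_rows_cols_alt]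
  rw [e1, e2, e3, e4, hcellr, hcellc, hs1, hs2, hs3, hs4]
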